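-- pv_equiv track=rewrite | github.com/SanichMyshkin/transfer | metrics_py/metrics/repo_size.py | get_task_status_for_blob
-- ===== SOURCE A (Python) =====
-- def get_task_status_for_blob(tasks: list, blob_name: str, task_type: str) -> int:
--     status = 0
--     for task in tasks:
--         if task.get("type") != task_type:
--             continue
--         if task.get("blob_name") != blob_name:
--             continue
--         if task.get("lastRunResult") != "OK":
--             return -1
--         status = 1
--     return status
-- ===== SOURCE B (Python) =====
-- def get_task_status_for_blob(tasks: list, blob_name: str, task_type: str) -> int:
--     matches = [t for t in tasks
--                if t.get("type") == task_type and t.get("blob_name") == blob_name]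
--     if not matches:
--         return 0
--     if any(t.get("lastRunResult") != "OK" for t in matches):
--         return -1
--     return 1
-- ===== Notes on version B (the rewrite author's own statement) =====
-- stated objective: simpler
-- what changed: Replaces the single fused loop with a status flag and early return by a filter of the matching tasks followed by a classification (empty -> 0, any non-OK -> -1, else 1); equivalent because the early -1 fires iff some match is non-OK.
import Mathlib
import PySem

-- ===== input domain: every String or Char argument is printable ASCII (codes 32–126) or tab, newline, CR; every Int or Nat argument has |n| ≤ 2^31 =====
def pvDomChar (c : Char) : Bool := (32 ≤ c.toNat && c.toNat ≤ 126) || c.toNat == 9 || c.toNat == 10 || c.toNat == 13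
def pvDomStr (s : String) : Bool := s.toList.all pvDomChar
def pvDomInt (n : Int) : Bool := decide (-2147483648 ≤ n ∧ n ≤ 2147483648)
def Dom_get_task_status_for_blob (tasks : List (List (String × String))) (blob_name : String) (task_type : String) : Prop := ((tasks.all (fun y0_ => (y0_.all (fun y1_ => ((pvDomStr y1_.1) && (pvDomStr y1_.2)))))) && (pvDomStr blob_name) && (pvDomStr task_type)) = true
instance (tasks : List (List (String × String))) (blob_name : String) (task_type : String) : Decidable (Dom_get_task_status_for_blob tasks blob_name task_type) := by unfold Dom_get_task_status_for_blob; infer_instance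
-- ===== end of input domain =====

-- B replaces A's fused loop (status flag + early return) by a filter of the matching
-- tasks followed by a classification pass (simpler decomposition, same cost).

-- task.get(k) (first-match lookup in the association list)
def pvTaskGet? (task : List (String × String)) (k : String) : Option String :=
  (PySem.Dict.mk task).get? k

-- ===== PORT A =====
-- the for-loop with its `status` accumulator and early `return -1`
def pvLoopA (blob_name task_type : String) : List (List (String × String)) → Int → Int
  | [], status => status
  | task :: rest, status =>
    if pvTaskGet? task "type" ≠ some task_type then pvLoopA blob_name task_type rest status
    else if pvTaskGet? task "blob_name" ≠ some blob_name then pvLoopA blob_name task_type rest status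
    else if pvTaskGet? task "lastRunResult" ≠ some "OK" then -1
    else pvLoopA blob_name task_type rest 1

def get_task_status_for_blob (tasks : List (List (String × String))) (blob_name : String) (task_type : String) : Int :=
  pvLoopA blob_name task_type tasks 0

-- ===== PORT B =====
def get_task_status_for_blob_alt (tasks : List (List (String × String))) (blob_name : String) (task_type : String) : Int :=
  let pvMatches := tasks.filter (fun t =>
    pvTaskGet? t "type" == some task_type && pvTaskGet? t "blob_name" == some blob_name)
  if pvMatches.isEmpty then 0
  else if pvMatches.any (fun t => pvTaskGet? t "lastRunResult" != some "OK") then -1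
  else 1

-- ===== PRECONDITION & SPEC =====
def Spec_get_task_status_for_blob (tasks : List (List (String × String))) (blob_name : String) (task_type : String) (out : Int) : Prop := out = get_task_status_for_blob_alt tasks blob_name task_type
instance (tasks : List (List (String × String))) (blob_name : String) (task_type : String) (out : Int) : Decidable (Spec_get_task_status_for_blob tasks blob_name task_type out) := by unfold Spec_get_task_status_for_blob; infer_instance

-- ===== CLAIM (what is proved, stated in full; the proofs are below) =====
def Claim_equal_get_task_status_for_blob : Prop := ∀ (tasks : List (List (String × String))) (blob_name : String) (task_type : String), Dom_get_task_status_for_blob tasks blob_name task_type → Spec_get_task_status_for_blob tasks blob_name task_type (get_task_status_for_blob tasks blob_name task_type)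

-- ===== LEMMAS AND PROOFS =====

-- A's loop from any status ∈ {0,1}: empty pvMatches → status, any bad match → -1, else 1.
theorem pvLoopA_eq (blob_name task_type : String) (tasks : List (List (String × String)))
    (status : Int) (hs : status = 0 ∨ status = 1) :
    pvLoopA blob_name task_type tasks status =
      (let pvMatches := tasks.filter (fun t =>
        pvTaskGet? t "type" == some task_type && pvTaskGet? t "blob_name" == some blob_name)
      if pvMatches.isEmpty then status
      else if pvMatches.any (fun t => pvTaskGet? t "lastRunResult" != some "OK") then -1
      else 1) := by
  induction tasks generalizing status with
  | nil => simp [pvLoopA]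
  | cons task rest ih =>
    simp only [pvLoopA, List.filter_cons]
    by_cases h1 : pvTaskGet? task "type" = some task_type
    · by_cases h2 : pvTaskGet? task "blob_name" = some blob_name
      · simp only [h1, h2, ne_eq, not_true_eq_false, if_false, beq_self_eq_true,
          Bool.and_self, if_true]
        by_cases h3 : pvTaskGet? task "lastRunResult" = some "OK"
        · rw [ih 1 (Or.inr rfl)]
          simp only [h3]
          by_cases he : (rest.filter (fun t =>
              pvTaskGet? t "type" == some task_type &&
              pvTaskGet? t "blob_name" == some blob_name)).isEmpty
          · simp [List.isEmpty_iff.mp he, h3]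
          · simp only [List.isEmpty_iff] at he
            simp [he, List.any_cons, h3]
        · simp [h3]
      · simp [h1, h2, ih status hs]
    · have : (pvTaskGet? task "type" == some task_type &&
          pvTaskGet? task "blob_name" == some blob_name) = false := by
        simp [h1]
      simp [h1, this, ih status hs]

-- ===== VERDICT (by name: the statement is the Claim_ definition above) =====
theorem get_task_status_for_blob_spec : Claim_equal_get_task_status_for_blob := by
  intro tasks blob_name task_type _
  unfold Spec_get_task_status_for_blob get_task_status_for_blob get_task_status_for_blob_alt
  exact pvLoopA_eq blob_name task_type tasks 0 (Or.inl rfl)
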